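-- pv_equiv track=rewrite | github.com/DeborahPerez/BioInformatics_I | motifenumerationbrute2_file.py | wordlist
-- ===== SOURCE A (Python) =====
-- def HammingDistance(g1, g2):
--     distance=0
--     for i,j in zip(g1,g2):
--         if i!=j:
--             distance=distance+1
--     return distance
--
-- def CumputeNumberToPatern(number,ndigits):
--     dic={'0':'A','1':'C','2':'G','3':'T'}
--     patern=''
--     #if number == 0:
--     #    return [0]
--     digits = []
--     while number:
--         digits.append(int(number % 4))
--         number /= 4
--         number=int(number)
--     for i in digits[::-1]:
--         patern=patern+dic[str(i)]
--     if len(patern)<ndigits: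
--         for i in range(0,ndigits-len(patern),1):
--             patern=dic['0']+patern
--     return patern
--
-- def neighbours(chunk,vr):
--     outlst=list()
--     tmplst=list()
--     lc=len(chunk)
--     for n in range(0,4**lc,1):
--         t=CumputeNumberToPatern(n,len(chunk))
--         ds=HammingDistance(chunk,t)
--         if ds<=vr:
--             outlst.append(t)
--     return outlst
--
-- def wordlist(mtx,size,mismatches):
--     tmpresult=dict()
--     result=list()
--
--
--     for l in mtx:
--         code=l
--         codelen=len(code)+1
--         for n in range(0,codelen-size,1):
--             kmer=code[n:n+size]
--             if tmpresult.get(kmer, 0)==0: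
--                 tmpresult[kmer]=1
--             for m in neighbours(kmer,mismatches):
--                 if tmpresult.get(m, 0)==0:
--                     tmpresult[m]=1
--     for n in tmpresult:
--         kmer=n
--         result.append(kmer)
--     return result
-- ===== SOURCE B (Python) =====
-- def wordlist(mtx, size, mismatches):
--     # Recursive d-neighbourhood generation in A<C<G<T lexicographic order
--     # (matching A's numeric enumeration order), collected with dict.setdefault.
--     def nb(chunk, d):
--         if d < 0:
--             return []
--         if not chunk:
--             return ['']
--         out = []
--         first, rest = chunk[0], chunk[1:]
--         for c in 'ACGT':
--             for tail in nb(rest, d if c == first else d - 1):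
--                 out.append(c + tail)
--         return out
--
--     seen = dict()
--     for code in mtx:
--         for n in range(len(code) - size + 1):
--             kmer = code[n:n + size]
--             seen.setdefault(kmer, True)
--             for m in nb(kmer, mismatches):
--                 seen.setdefault(m, True)
--     return list(seen)
-- ===== Notes on version B (the rewrite author's own statement) =====
-- stated objective: alternative
-- what changed: Replaces brute-force enumeration of all 4^k base-4 patterns filtered by Hamming distance with recursive generation of only the d-neighbourhood (pruning when the mismatch budget goes negative), emitted in the same A<C<G<T lexicographic order, collected with dict.setdefault.
import Mathlib
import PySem

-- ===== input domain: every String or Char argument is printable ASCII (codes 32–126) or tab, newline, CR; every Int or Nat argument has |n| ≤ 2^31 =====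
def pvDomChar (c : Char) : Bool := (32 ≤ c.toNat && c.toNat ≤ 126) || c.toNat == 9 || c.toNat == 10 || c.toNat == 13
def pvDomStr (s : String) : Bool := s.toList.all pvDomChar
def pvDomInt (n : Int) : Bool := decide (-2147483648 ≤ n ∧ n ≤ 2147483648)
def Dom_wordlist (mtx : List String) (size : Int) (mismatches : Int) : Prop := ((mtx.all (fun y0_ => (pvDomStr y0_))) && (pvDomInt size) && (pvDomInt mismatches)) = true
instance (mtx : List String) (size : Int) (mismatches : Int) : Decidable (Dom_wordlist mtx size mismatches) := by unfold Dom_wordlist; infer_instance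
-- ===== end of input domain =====

-- B replaces A's brute-force enumeration of all 4^k patterns (filtered by Hamming
-- distance) with recursive generation of the mismatch-neighbourhood only, in the
-- same A<C<G<T order (objective: alternative algorithm; equal value on all inputs).
-- Strings are modelled as List Char internally, converted back with String.ofList.

-- ===== PORT A =====

-- HammingDistance(g1, g2)
def pyHamming (g1 g2 : List Char) : Int :=
  (g1.zip g2).foldl (fun distance ij => if ij.1 ≠ ij.2 then distance + 1 else distance) 0

-- the digit-collecting while-loop of CumputeNumberToPatern; `int(number/4)` is
-- truncation toward zero = Int.tdiv (exact: float division is exact at the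
-- magnitudes any terminating run reaches)
def pyDigits (number : Int) : List Int :=
  if number = 0 then []
  else PySem.Int.mod number 4 :: pyDigits (number.tdiv 4)
termination_by number.natAbs
decreasing_by
  rename_i h
  rw [Int.natAbs_tdiv]
  exact Nat.div_lt_self (Int.natAbs_pos.mpr h) (by norm_num)

-- dic = {'0':'A','1':'C','2':'G','3':'T'}; the keys reached are always 0..3
def dicGet (i : Int) : Char :=
  if i = 0 then 'A' else if i = 1 then 'C' else if i = 2 then 'G' else 'T'

-- the left-padding loop of CumputeNumberToPatern
def patPad (patern : List Char) (ndigits : Int) : List Char :=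
  if (patern.length : Int) < ndigits then
    (PySem.List.pyRange 0 (ndigits - (patern.length : Int)) 1).foldl
      (fun patern _ => 'A' :: patern) patern
  else patern

-- CumputeNumberToPatern(number, ndigits)
def numToPattern (number : Int) (ndigits : Int) : List Char :=
  patPad ((pyDigits number).reverse.map (fun i => dicGet i)) ndigits

-- neighbours(chunk, vr)
def neighboursA (chunk : List Char) (vr : Int) : List (List Char) :=
  let lc := chunk.length
  (PySem.List.pyRange 0 ((4 : Int) ^ lc) 1).foldl
    (fun outlst n =>
      let t := numToPattern n (lc : Int)
      let ds := pyHamming chunk t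
      if ds ≤ vr then outlst ++ [t] else outlst) []

def wordlist (mtx : List String) (size : Int) (mismatches : Int) : List String :=
  let tmpresult : PySem.Dict (List Char) Int := PySem.Dict.empty
  let tmpresult := mtx.foldl (fun tmpresult l =>
    let code := l.toList
    let codelen : Int := (code.length : Int) + 1
    (PySem.List.pyRange 0 (codelen - size) 1).foldl (fun tmpresult n =>
      let kmer := PySem.List.slice code (some n) (some (n + size))
      let tmpresult := if tmpresult.getD kmer 0 = 0 then tmpresult.insert kmer 1 else tmpresult
      (neighboursA kmer mismatches).foldl (fun tmpresult m =>
        if tmpresult.getD m 0 = 0 then tmpresult.insert m 1 else tmpresult) tmpresult)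
      tmpresult) tmpresult
  tmpresult.keys.foldl (fun result n => result ++ [String.ofList n]) []

-- ===== PORT B =====

-- nb(chunk, d): the d-neighbourhood of chunk over ACGT, in A<C<G<T order
def nbB (chunk : List Char) (d : Int) : List (List Char) :=
  match chunk with
  | [] => if d < 0 then [] else [[]]
  | first :: rest =>
    if d < 0 then []
    else
      ['A', 'C', 'G', 'T'].foldl (fun out c =>
        (nbB rest (if c = first then d else d - 1)).foldl
          (fun out tail => out ++ [c :: tail]) out) []

def wordlist_alt (mtx : List String) (size : Int) (mismatches : Int) : List String :=
  let seen : PySem.Set (List Char) := PySem.Set.empty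
  let seen := mtx.foldl (fun seen l =>
    let code := l.toList
    (PySem.List.pyRange 0 ((code.length : Int) - size + 1) 1).foldl (fun seen n =>
      let kmer := PySem.List.slice code (some n) (some (n + size))
      let seen := PySem.Set.add seen kmer
      (nbB kmer mismatches).foldl (fun seen m => PySem.Set.add seen m) seen) seen) seen
  seen.map (fun n => String.ofList n)

-- ===== PRECONDITION & SPEC =====
def Spec_wordlist (mtx : List String) (size : Int) (mismatches : Int) (out : List String) : Prop := out = wordlist_alt mtx size mismatches
instance (mtx : List String) (size : Int) (mismatches : Int) (out : List String) : Decidable (Spec_wordlist mtx size mismatches out) := by unfold Spec_wordlist; infer_instance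

-- ===== CLAIM (what is proved, stated in full; the proofs are below) =====
def Claim_equal_wordlist : Prop := ∀ (mtx : List String) (size : Int) (mismatches : Int), Dom_wordlist mtx size mismatches → Spec_wordlist mtx size mismatches (wordlist mtx size mismatches)

-- ===== LEMMAS AND PROOFS =====

-- all ACGT strings of length k, grouped by first character (B's traversal order)
def allW : Nat → List (List Char)
  | 0 => [[]]
  | k + 1 => ['A', 'C', 'G', 'T'].flatMap (fun c => (allW k).map (fun p => c :: p))

theorem allW_snoc (k : Nat) :
    allW (k + 1) = (allW k).flatMap (fun p => ['A', 'C', 'G', 'T'].map (fun c => p ++ [c])) := by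
  induction k with
  | zero => rfl
  | succ k ih =>
    show ['A','C','G','T'].flatMap (fun c => (allW (k+1)).map (fun p => c :: p)) = _
    conv_lhs => rw [ih]
    conv_rhs => rw [allW]
    simp [List.flatMap_def, List.map_map, List.map_flatten, Function.comp_def]

theorem pyHamming_eq (g1 g2 : List Char) :
    pyHamming g1 g2 = ((g1.zip g2).countP (fun ij => ij.1 != ij.2) : Int) := by
  unfold pyHamming
  rw [PySem.List.foldl_ite_add_one (fun ij : Char × Char => ij.1 ≠ ij.2) (g1.zip g2) 0]
  rw [zero_add]
  congr 1
  apply List.countP_congr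
  intro x _
  simp [bne_iff_ne]

theorem pyHamming_nonneg (g1 g2 : List Char) : 0 ≤ pyHamming g1 g2 := by
  rw [pyHamming_eq]; positivity

theorem pyHamming_cons (a b : Char) (g1 g2 : List Char) :
    pyHamming (a :: g1) (b :: g2) = (if a = b then 0 else 1) + pyHamming g1 g2 := by
  rw [pyHamming_eq, pyHamming_eq, List.zip_cons_cons, List.countP_cons]
  by_cases h : a = b <;> simp [h] <;> ring

theorem foldl_prepend (l : List Int) (init : List Char) :
    l.foldl (fun p _ => 'A' :: p) init = List.replicate l.length 'A' ++ init := by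
  induction l generalizing init with
  | nil => rfl
  | cons x xs ih => simp [List.foldl_cons, ih, List.replicate_succ']

theorem patPad_eq (p : List Char) (nd : Int) :
    patPad p nd = List.replicate (nd - (p.length : Int)).toNat 'A' ++ p := by
  unfold patPad
  split
  · rw [foldl_prepend, PySem.List.length_pyRange_one]
    simp
  · rename_i h
    rw [show (nd - (p.length : Int)).toNat = 0 by omega]
    simp

theorem digits_zero : pyDigits 0 = [] := by unfold pyDigits; simp

theorem digits_succ (n : Int) (h : n ≠ 0) :
    pyDigits n = PySem.Int.mod n 4 :: pyDigits (n.tdiv 4) := by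
  conv_lhs => unfold pyDigits
  simp [h]

theorem numToPattern_zero (k : Nat) : numToPattern 0 (k : Int) = List.replicate k 'A' := by
  rw [numToPattern, patPad_eq, digits_zero]
  simp

theorem numToPattern_succ (n : Int) (hn : 0 ≤ n) (k : Nat) :
    numToPattern n ((k : Int) + 1) =
      numToPattern (n.tdiv 4) (k : Int) ++ [dicGet (PySem.Int.mod n 4)] := by
  rcases eq_or_lt_of_le hn with h0 | hpos
  · rw [← h0]
    have ht : (0 : Int).tdiv 4 = 0 := rfl
    rw [ht, numToPattern_zero]
    rw [show ((k : Int) + 1) = ((k + 1 : Nat) : Int) by push_cast; ring, numToPattern_zero]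
    have hm : PySem.Int.mod 0 4 = 0 := by decide
    rw [hm, List.replicate_succ']
    rfl
  · rw [numToPattern, numToPattern, patPad_eq, patPad_eq]
    rw [digits_succ n (by omega)]
    simp only [List.reverse_cons, List.map_append, List.map_cons, List.map_nil]
    set q := (pyDigits (n.tdiv 4)).reverse.map (fun i => dicGet i) with hq
    rw [show ((k:Int) + 1 - ((q ++ [dicGet (PySem.Int.mod n 4)]).length : Int)).toNat
        = ((k:Int) - (q.length : Int)).toNat by simp]
    simp [List.append_assoc]

theorem tdiv_four (q r : Int) (hq : 0 ≤ q) (hr : 0 ≤ r) (h4 : r < 4) : (4*q+r).tdiv 4 = q := by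
  rw [Int.tdiv_eq_ediv, if_pos (Or.inl (by omega))]; omega

theorem mod_four (q r : Int) (hr : 0 ≤ r) (h4 : r < 4) : PySem.Int.mod (4*q+r) 4 = r := by
  unfold PySem.Int.mod
  rw [Int.fmod_eq_emod, if_pos (Or.inl (by omega))]; omega

-- range(0, 4*m) grouped in blocks of four consecutive numbers
theorem pyRange_four_blocks (m : Nat) :
    PySem.List.pyRange 0 (4 * (m : Int)) 1 =
      (PySem.List.pyRange 0 (m : Int) 1).flatMap
        (fun q => [4*q, 4*q+1, 4*q+2, 4*q+3]) := by
  induction m with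
  | zero => simp [PySem.List.pyRange_one_eq_nil]
  | succ m ih =>
    rw [show ((m + 1 : Nat) : Int) = (m : Int) + 1 by push_cast; ring]
    rw [PySem.List.pyRange_one_succ_right (by positivity), List.flatMap_append, ← ih]
    rw [show (4 : Int) * ((m : Int) + 1) = (4 * (m : Int) + 3) + 1 by ring,
        PySem.List.pyRange_one_succ_right (by positivity),
        show (4 * (m : Int) + 3) = (4 * (m : Int) + 2) + 1 by ring,
        PySem.List.pyRange_one_succ_right (by positivity),
        show (4 * (m : Int) + 2) = (4 * (m : Int) + 1) + 1 by ring,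
        PySem.List.pyRange_one_succ_right (by positivity),
        show (4 * (m : Int) + 1) = (4 * (m : Int)) + 1 by ring,
        PySem.List.pyRange_one_succ_right (by positivity)]
    simp [List.append_assoc]
    omega

-- the numeric enumeration of CumputeNumberToPatern patterns is exactly allW
theorem map_numToPattern_range (k : Nat) :
    (PySem.List.pyRange 0 ((4 : Int) ^ k) 1).map (fun n => numToPattern n (k : Int)) = allW k := by
  induction k with
  | zero =>
    rw [show ((4 : Int) ^ 0) = 0 + 1 by norm_num, PySem.List.pyRange_one_succ_right le_rfl]
    simp [PySem.List.pyRange_one_eq_nil, allW]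
    exact numToPattern_zero 0
  | succ k ih =>
    rw [show ((4 : Int) ^ (k + 1)) = 4 * (((4 ^ k : Nat) : Nat) : Int) by push_cast; ring]
    rw [pyRange_four_blocks, List.map_flatMap]
    rw [allW_snoc, ← ih]
    rw [show (((4 ^ k : Nat) : Nat) : Int) = (4 : Int) ^ k by push_cast; ring]
    rw [List.flatMap_def, List.flatMap_def, List.map_map]
    congr 1
    apply List.map_congr_left
    intro q hq
    have hq0 : 0 ≤ q := ((PySem.List.mem_pyRange_one).mp hq).1
    simp only [Function.comp_apply, List.map_cons, List.map_nil]
    rw [show ((k + 1 : Nat) : Int) = (k : Int) + 1 by push_cast; ring]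
    have h0 := numToPattern_succ (4*q) (by omega) k
    rw [show (4*q : Int).tdiv 4 = q from by
          rw [show (4*q : Int) = 4*q + 0 by ring]; exact tdiv_four q 0 hq0 (by norm_num) (by norm_num),
        show PySem.Int.mod (4*q) 4 = 0 from by
          rw [show (4*q : Int) = 4*q + 0 by ring]; exact mod_four q 0 (by norm_num) (by norm_num)] at h0
    have h1 := numToPattern_succ (4*q+1) (by omega) k
    rw [tdiv_four q 1 hq0 (by norm_num) (by norm_num), mod_four q 1 (by norm_num) (by norm_num)] at h1
    have h2 := numToPattern_succ (4*q+2) (by omega) k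
    rw [tdiv_four q 2 hq0 (by norm_num) (by norm_num), mod_four q 2 (by norm_num) (by norm_num)] at h2
    have h3 := numToPattern_succ (4*q+3) (by omega) k
    rw [tdiv_four q 3 hq0 (by norm_num) (by norm_num), mod_four q 3 (by norm_num) (by norm_num)] at h3
    rw [h0, h1, h2, h3]
    rfl

-- neighbours(chunk, vr) is the Hamming-ball filter of allW
theorem neighboursA_eq_filter (chunk : List Char) (vr : Int) :
    neighboursA chunk vr = (allW chunk.length).filter (fun t => pyHamming chunk t ≤ vr) := by
  unfold neighboursA
  rw [PySem.List.foldl_append_ite (fun n => pyHamming chunk (numToPattern n (chunk.length : Int)) ≤ vr)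
        (fun n => numToPattern n (chunk.length : Int))]
  rw [List.nil_append]
  rw [show (fun n => decide (pyHamming chunk (numToPattern n (chunk.length : Int)) ≤ vr))
      = (fun t => decide (pyHamming chunk t ≤ vr)) ∘ (fun n => numToPattern n (chunk.length : Int)) from rfl]
  rw [← List.filter_map, map_numToPattern_range]

theorem nbB_eq_filter (chunk : List Char) (d : Int) :
    nbB chunk d = (allW chunk.length).filter (fun t => pyHamming chunk t ≤ d) := by
  induction chunk generalizing d with
  | nil =>
    have hnb : nbB [] d = if d < 0 then [] else [[]] := rfl
    have hh : pyHamming [] [] = 0 := rfl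
    rw [hnb, List.length_nil, show allW 0 = [[]] from rfl, List.filter_cons, List.filter_nil]
    by_cases hd : d < 0
    · rw [if_pos hd, if_neg (by simp [hh]; omega)]
    · rw [if_neg hd, if_pos (by simp [hh]; omega)]
  | cons first rest ih =>
    show nbB (first :: rest) d = _
    by_cases hd : d < 0
    · rw [nbB, if_pos hd]
      symm
      rw [List.filter_eq_nil_iff]
      intro t _
      have := pyHamming_nonneg (first :: rest) t
      simp
      omega
    · rw [nbB, if_neg hd]
      simp only [PySem.List.foldl_append_singleton_eq_map]
      rw [show (fun (out : List (List Char)) c =>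
            out ++ (nbB rest (if c = first then d else d - 1)).map (fun tail => c :: tail))
          = (fun out c => out ++ ((fun c => (nbB rest (if c = first then d else d - 1)).map
              (fun tail => c :: tail)) c)) from rfl]
      rw [PySem.List.foldl_append_eq_flatMap, List.nil_append]
      show _ = (allW (rest.length + 1)).filter _
      rw [allW, List.filter_flatMap]
      rw [List.flatMap_def, List.flatMap_def]
      congr 1
      apply List.map_congr_left
      intro c _
      rw [List.filter_map, ih]
      congr 1
      apply List.filter_congr
      intro t _
      simp only [Function.comp_apply]
      rw [pyHamming_cons]
      by_cases hc : c = first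
      · simp [hc]
      · have hfc : ¬ (first = c) := fun h => hc h.symm
        simp [hc, hfc]
        constructor <;> (intro h; omega)

theorem neighbours_eq (chunk : List Char) (vr : Int) : neighboursA chunk vr = nbB chunk vr := by
  rw [neighboursA_eq_filter, nbB_eq_filter]

-- A's dict update, as a step function
def dStep (d : PySem.Dict (List Char) Int) (k : List Char) : PySem.Dict (List Char) Int :=
  if d.getD k 0 = 0 then d.insert k 1 else d

theorem dict_set_keys (ks : List (List Char)) (d : PySem.Dict (List Char) Int)
    (s : PySem.Set (List Char))
    (hv : ∀ k v, d.get? k = some v → v = 1) (hk : d.keys = s) :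
    (ks.foldl dStep d).keys = ks.foldl PySem.Set.add s := by
  induction ks generalizing d s with
  | nil => simpa using hk
  | cons k ks ih =>
    rw [List.foldl_cons, List.foldl_cons]
    by_cases h : d.getD k 0 = 0
    · have hnone : d.get? k = none := by
        cases hg : d.get? k with
        | none => rfl
        | some v =>
          have hv1 := hv k v hg
          have : d.getD k 0 = v := by
            unfold PySem.Dict.getD
            rw [hg]
            rfl
          omega
      have hcont : d.contains k = false := (PySem.Dict.get?_eq_none_iff_contains d k).mp hnone
      have hmem : k ∉ s := by
        rw [← hk]
        intro hm
        rw [(PySem.Dict.contains_iff_mem_keys d k).mpr hm] at hcont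
        exact Bool.noConfusion hcont
      rw [show dStep d k = d.insert k 1 from by unfold dStep; rw [if_pos h]]
      rw [PySem.Set.add_of_not_mem hmem]
      apply ih
      · intro j v hj
        by_cases hjk : j = k
        · subst hjk
          rw [PySem.Dict.get?_insert_self] at hj
          injection hj with h2
          omega
        · rw [PySem.Dict.get?_insert_of_ne _ _ hjk] at hj
          exact hv j v hj
      · rw [PySem.Dict.keys_insert_of_not_contains d 1 hcont, hk]
    · have hmem : k ∈ s := by
        rw [← hk]
        rw [← PySem.Dict.contains_iff_mem_keys]
        cases hg : d.get? k with
        | none =>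
          exfalso
          apply h
          unfold PySem.Dict.getD
          rw [hg]
          rfl
        | some v =>
          cases hc2 : d.contains k with
          | false =>
            rw [(PySem.Dict.get?_eq_none_iff_contains d k).mpr hc2] at hg
            cases hg
          | true => rfl
      rw [show dStep d k = d from by unfold dStep; rw [if_neg h]]
      rw [PySem.Set.add_of_mem hmem]
      exact ih d s hv hk

-- the flat sequence of keys both programs feed their collection, per input string
def keySeq (mismatches : Int) (size : Int) (l : String) : List (List Char) :=
  (PySem.List.pyRange 0 (((l.toList.length : Int) + 1) - size) 1).flatMap
    (fun n => PySem.List.slice l.toList (some n) (some (n + size)) ::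
      nbB (PySem.List.slice l.toList (some n) (some (n + size))) mismatches)

theorem wordlist_eq_foldl (mtx : List String) (size mismatches : Int) :
    wordlist mtx size mismatches =
      (((mtx.flatMap (keySeq mismatches size)).foldl dStep PySem.Dict.empty).keys).map
        (fun n => String.ofList n) := by
  unfold wordlist
  rw [PySem.List.foldl_append_singleton_eq_map, List.nil_append]
  congr 2
  rw [List.foldl_flatMap]
  apply PySem.List.foldl_congr_mem
  intro acc l _
  unfold keySeq
  rw [List.foldl_flatMap]
  apply PySem.List.foldl_congr_mem
  intro acc2 n _
  rw [List.foldl_cons]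
  rw [← neighbours_eq]
  rfl

theorem wordlist_alt_eq_foldl (mtx : List String) (size mismatches : Int) :
    wordlist_alt mtx size mismatches =
      ((mtx.flatMap (keySeq mismatches size)).foldl PySem.Set.add PySem.Set.empty).map
        (fun n => String.ofList n) := by
  unfold wordlist_alt
  show (mtx.foldl (fun seen l =>
      (PySem.List.pyRange 0 ((l.toList.length : Int) - size + 1) 1).foldl (fun seen n =>
        (nbB (PySem.List.slice l.toList (some n) (some (n + size))) mismatches).foldl
          (fun seen m => PySem.Set.add seen m)
          (PySem.Set.add seen (PySem.List.slice l.toList (some n) (some (n + size)))))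
        seen) PySem.Set.empty).map (fun n => String.ofList n) = _
  congr 1
  rw [List.foldl_flatMap]
  apply PySem.List.foldl_congr_mem
  intro acc l _
  unfold keySeq
  rw [show ((l.toList.length : Int) + 1) - size = (l.toList.length : Int) - size + 1 by ring]
  rw [List.foldl_flatMap]
  apply PySem.List.foldl_congr_mem
  intro acc2 n _
  rfl

-- ===== VERDICT (by name: the statement is the Claim_ definition above) =====
theorem wordlist_spec : Claim_equal_wordlist := by
  intro mtx size mismatches _
  show wordlist mtx size mismatches = wordlist_alt mtx size mismatches
  rw [wordlist_eq_foldl, wordlist_alt_eq_foldl]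
  congr 1
  apply dict_set_keys
  · intro k v h
    simp [PySem.Dict.get?] at h
    exact absurd h (by simp [PySem.Dict.empty])
  · rfl
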